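-- pv_equiv track=rewrite | github.com/thomascastleman/hds-connect-four | util.py | numFromWinOnNSection
-- ===== SOURCE A (Python) =====
-- def numFromWinOnNSection(nsection, symbol):
-- 	moves = 0
-- 	for pos in nsection:
-- 		if pos == None:	# add up blank positions
-- 			moves += 1
-- 		elif pos != symbol:	# if interrupted by other symbol, no win possible
-- 			return None
-- 	return moves
-- ===== SOURCE B (Python) =====
-- def numFromWinOnNSection(nsection, symbol):
--     if any(pos is not None and pos != symbol for pos in nsection):
--         return None
--     return sum(1 for pos in nsection if pos == None)
-- ===== Notes on version B (the rewrite author's own statement) =====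
-- stated objective: simpler
-- what changed: Replaces the single interleaved loop with early return by a guard pass (any opponent symbol -> None) followed by an independent counting pass over blanks.
import Mathlib
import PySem

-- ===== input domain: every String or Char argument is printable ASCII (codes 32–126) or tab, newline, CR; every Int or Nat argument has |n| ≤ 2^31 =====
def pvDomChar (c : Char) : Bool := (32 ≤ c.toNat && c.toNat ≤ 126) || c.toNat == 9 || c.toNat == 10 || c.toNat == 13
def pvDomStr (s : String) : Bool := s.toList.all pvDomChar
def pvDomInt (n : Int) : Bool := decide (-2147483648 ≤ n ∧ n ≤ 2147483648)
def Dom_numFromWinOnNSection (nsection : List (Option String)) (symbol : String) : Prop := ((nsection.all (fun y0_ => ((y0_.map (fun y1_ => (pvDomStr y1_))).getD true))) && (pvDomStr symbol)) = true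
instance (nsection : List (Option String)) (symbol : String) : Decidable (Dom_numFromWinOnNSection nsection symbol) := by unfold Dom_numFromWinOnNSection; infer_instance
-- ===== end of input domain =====

-- B replaces A's single interleaved loop (count blanks, early-return on opponent symbol)
-- by a guard pass followed by an independent counting pass (objective: simpler).

-- ===== PORT A =====
-- loop with accumulator `moves` and early return on an opponent symbol
def numFromWinOnNSectionGo (symbol : String) (moves : Int) : List (Option String) → Option Int
  | [] => some moves
  | pos :: rest =>
    if pos = none then numFromWinOnNSectionGo symbol (moves + 1) rest
    else if pos ≠ some symbol then none
    else numFromWinOnNSectionGo symbol moves rest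

def numFromWinOnNSection (nsection : List (Option String)) (symbol : String) : Option Int :=
  numFromWinOnNSectionGo symbol 0 nsection

-- ===== PORT B =====
def numFromWinOnNSection_alt (nsection : List (Option String)) (symbol : String) : Option Int :=
  if nsection.any (fun pos => pos ≠ none && pos ≠ some symbol) then none
  else some ((nsection.filter (fun pos => pos = none)).length : Int)

-- ===== PRECONDITION & SPEC =====
def Spec_numFromWinOnNSection (nsection : List (Option String)) (symbol : String) (out : Option Int) : Prop := out = numFromWinOnNSection_alt nsection symbol
instance (nsection : List (Option String)) (symbol : String) (out : Option Int) : Decidable (Spec_numFromWinOnNSection nsection symbol out) := by unfold Spec_numFromWinOnNSection; infer_instance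

-- ===== CLAIM (what is proved, stated in full; the proofs are below) =====
def Claim_equal_numFromWinOnNSection : Prop := ∀ (nsection : List (Option String)) (symbol : String), Dom_numFromWinOnNSection nsection symbol → Spec_numFromWinOnNSection nsection symbol (numFromWinOnNSection nsection symbol)

-- ===== LEMMAS AND PROOFS =====
theorem numFromWinOnNSectionGo_eq (symbol : String) (nsection : List (Option String)) :
    ∀ moves : Int, numFromWinOnNSectionGo symbol moves nsection =
      if nsection.any (fun pos => pos ≠ none && pos ≠ some symbol) then none
      else some (moves + ((nsection.filter (fun pos => pos = none)).length : Int)) := by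
  induction nsection with
  | nil => intro moves; simp [numFromWinOnNSectionGo]
  | cons pos rest ih =>
    intro moves
    by_cases hn : pos = none
    · subst hn
      simp [numFromWinOnNSectionGo, ih, List.any_cons, List.filter_cons]
      split_ifs with h
      · rfl
      · ring_nf
    · by_cases hs : pos = some symbol
      · subst hs
        simp [numFromWinOnNSectionGo, ih, List.any_cons, List.filter_cons]
      · simp [numFromWinOnNSectionGo, hn, hs, List.any_cons]

-- ===== VERDICT (by name: the statement is the Claim_ definition above) =====
theorem numFromWinOnNSection_spec : Claim_equal_numFromWinOnNSection := by
  intro ns symbol _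
  unfold Spec_numFromWinOnNSection numFromWinOnNSection numFromWinOnNSection_alt
  rw [numFromWinOnNSectionGo_eq]
  split_ifs <;> simp
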